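-- pv_equiv track=rewrite | github.com/satoshikawato/gbdraw | gbdraw/api/diagram.py | _resolve_multi_record_default_row_counts
-- ===== SOURCE A (Python) =====
-- import math
--
-- def _estimate_square_grid(record_count: int) -> tuple[int, int]:
--     """Return grid dimensions (cols, rows) close to square."""
--     if record_count <= 0:
--         return 1, 1
--     cols = int(math.ceil(math.sqrt(record_count)))
--     rows = int(math.ceil(float(record_count) / float(cols)))
--     return cols, rows
--
-- def _resolve_multi_record_default_row_counts(record_count: int) -> list[int]:
--     """Resolve default near-square row counts for multi-record canvas layout."""
--     if record_count <= 0: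
--         return []
--     cols, rows = _estimate_square_grid(record_count)
--     counts: list[int] = []
--     for row in range(rows):
--         start = row * cols
--         end = min(record_count, start + cols)
--         if end > start:
--             counts.append(end - start)
--     return counts
-- ===== SOURCE B (Python) =====
-- import math
--
-- def _resolve_multi_record_default_row_counts(record_count: int) -> list[int]:
--     if record_count <= 0:
--         return []
--     cols = math.isqrt(record_count - 1) + 1
--     full, rem = divmod(record_count, cols)
--     return [cols] * full + ([rem] if rem else [])
-- ===== Notes on version B (the rewrite author's own statement) =====
-- stated objective: simpler
-- what changed: B computes cols as the integer ceiling square root via math.isqrt and builds the row-count list in closed form as cols repeated full-quotient times plus the remainder row, instead of looping over rows with start/end clamping.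
import Mathlib
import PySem

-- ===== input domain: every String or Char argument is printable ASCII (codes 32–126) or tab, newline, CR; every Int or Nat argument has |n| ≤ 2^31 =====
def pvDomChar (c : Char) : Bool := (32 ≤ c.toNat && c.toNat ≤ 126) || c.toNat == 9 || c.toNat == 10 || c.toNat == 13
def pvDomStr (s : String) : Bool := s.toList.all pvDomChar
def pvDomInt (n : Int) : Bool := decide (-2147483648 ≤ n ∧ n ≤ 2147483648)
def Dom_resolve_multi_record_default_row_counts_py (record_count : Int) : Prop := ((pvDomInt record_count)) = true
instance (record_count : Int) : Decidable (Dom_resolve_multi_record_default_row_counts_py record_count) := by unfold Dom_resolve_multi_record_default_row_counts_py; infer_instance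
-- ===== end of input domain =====

-- B replaces A's row loop with closed-form arithmetic: [cols]*(n//cols) plus the remainder row (objective: simpler).

-- ===== PORT A =====
-- int(math.ceil(math.sqrt(n))) for n ≥ 1: ported as the exact integer ceiling of the square root
-- (exact on the domain |n| ≤ 2^31, where the correctly rounded double sqrt cannot cross an integer).
def pyCeilSqrt (n : Int) : Int :=
  let s := Nat.sqrt n.toNat
  if s * s = n.toNat then (s : Int) else (s : Int) + 1

-- int(math.ceil(float(n) / float(cols))): ported as exact ceiling division (exact on the domain).
def pyCeilDiv (n cols : Int) : Int := -(PySem.Int.floordiv (-n) cols)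

def estimate_square_grid_py (record_count : Int) : Int × Int :=
  if record_count ≤ 0 then (1, 1)
  else
    let cols := pyCeilSqrt record_count
    let rows := pyCeilDiv record_count cols
    (cols, rows)

def resolve_multi_record_default_row_counts_py (record_count : Int) : List Int :=
  if record_count ≤ 0 then []
  else
    let p := estimate_square_grid_py record_count
    let cols := p.1
    let rows := p.2
    (PySem.List.pyRange 0 rows 1).foldl
      (fun counts row =>
        let start := row * cols
        let e := min record_count (start + cols)
        if e > start then counts ++ [e - start] else counts) []

-- ===== PORT B =====
def resolve_multi_record_default_row_counts_py_alt (record_count : Int) : List Int :=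
  if record_count ≤ 0 then []
  else
    let cols : Int := (Nat.sqrt (record_count - 1).toNat : Int) + 1  -- math.isqrt(n-1) + 1
    let full := PySem.Int.floordiv record_count cols
    let rem := PySem.Int.mod record_count cols
    List.replicate full.toNat cols ++ (if rem ≠ 0 then [rem] else [])

-- ===== PRECONDITION & SPEC =====
def Spec_resolve_multi_record_default_row_counts_py (record_count : Int) (out : List Int) : Prop := out = resolve_multi_record_default_row_counts_py_alt record_count
instance (record_count : Int) (out : List Int) : Decidable (Spec_resolve_multi_record_default_row_counts_py record_count out) := by unfold Spec_resolve_multi_record_default_row_counts_py; infer_instance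

-- ===== CLAIM (what is proved, stated in full; the proofs are below) =====
def Claim_equal_resolve_multi_record_default_row_counts_py : Prop := ∀ (record_count : Int), Dom_resolve_multi_record_default_row_counts_py record_count → Spec_resolve_multi_record_default_row_counts_py record_count (resolve_multi_record_default_row_counts_py record_count)

-- ===== LEMMAS AND PROOFS =====

-- the two ways of computing ceil(sqrt n) agree for n ≥ 1
theorem ceilSqrt_eq (n : Int) (hn : 0 < n) :
    pyCeilSqrt n = (Nat.sqrt (n - 1).toNat : Int) + 1 := by
  unfold pyCeilSqrt
  have hN : n.toNat = (n - 1).toNat + 1 := by omega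
  set N := (n - 1).toNat with hNdef
  rw [hN]
  set s := Nat.sqrt (N + 1) with hs
  set t := Nat.sqrt N with ht
  have hs2 : s ^ 2 ≤ N + 1 := Nat.sqrt_le' (N + 1)
  have hs3 : N + 1 < (s + 1) ^ 2 := Nat.lt_succ_sqrt' (N + 1)
  have ht2 : t ^ 2 ≤ N := Nat.sqrt_le' N
  have ht3 : N < (t + 1) ^ 2 := Nat.lt_succ_sqrt' N
  have hts : t ≤ s := Nat.sqrt_le_sqrt (by omega)
  by_cases hsq : s * s = N + 1
  · have hsq2 : s ^ 2 = N + 1 := by rw [pow_two]; exact hsq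
    have h1 : t < s := by
      by_contra h
      push Not at h
      nlinarith
    have h2 : s ≤ t + 1 := by
      by_contra h
      push Not at h
      nlinarith
    rw [if_pos hsq]
    omega
  · have hsq2 : s ^ 2 ≤ N := by
      have : s ^ 2 ≠ N + 1 := by rw [pow_two]; exact hsq
      omega
    have h1 : s ≤ t := Nat.le_sqrt'.mpr hsq2
    rw [if_neg hsq]
    omega

-- bounds on ceil(sqrt n)
theorem pyCeilSqrt_bounds (n : Int) (hn : 0 < n) :
    0 < pyCeilSqrt n ∧ n ≤ pyCeilSqrt n * pyCeilSqrt n := by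
  have h1 : Nat.sqrt n.toNat ^ 2 ≤ n.toNat := Nat.sqrt_le' n.toNat
  have h2 : n.toNat < (Nat.sqrt n.toNat + 1) ^ 2 := Nat.lt_succ_sqrt' n.toNat
  have hnn : ((n.toNat : Int)) = n := by omega
  unfold pyCeilSqrt
  simp only []
  split_ifs with hs
  · constructor
    · by_contra h
      push Not at h
      have h0 : Nat.sqrt n.toNat = 0 := by exact_mod_cast by omega
      rw [h0] at hs
      omega
    · have hcast : ((Nat.sqrt n.toNat * Nat.sqrt n.toNat : Nat) : Int)
          = (Nat.sqrt n.toNat : Int) * (Nat.sqrt n.toNat : Int) := by push_cast; ring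
      omega
  · constructor
    · positivity
    · have h2' : n.toNat < (Nat.sqrt n.toNat + 1) * (Nat.sqrt n.toNat + 1) := by nlinarith [h2]
      have hcast : (((Nat.sqrt n.toNat + 1) * (Nat.sqrt n.toNat + 1) : Nat) : Int)
          = ((Nat.sqrt n.toNat : Int) + 1) * ((Nat.sqrt n.toNat : Int) + 1) := by push_cast; ring
      omega

-- the loop of A appends exactly cols for every full row
theorem loop_replicate (n c : Int) (hc : 0 < c) (k : Nat) (h : (k : Int) * c ≤ n) :
    (PySem.List.pyRange 0 (k : Int) 1).foldl
      (fun counts row =>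
        let start := row * c
        let e := min n (start + c)
        if e > start then counts ++ [e - start] else counts) [] = List.replicate k c := by
  induction k with
  | zero => simp [PySem.List.pyRange_one_eq_nil]
  | succ k ih =>
    have hk : ((k : Int) + 1) * c ≤ n := by push_cast at h ⊢; linarith
    have hk' : (k : Int) * c ≤ n := by nlinarith
    have hsplit : PySem.List.pyRange 0 ((k : Int) + 1) 1
        = PySem.List.pyRange 0 (k : Int) 1 ++ [(k : Int)] := by
      exact PySem.List.pyRange_one_succ_right (by positivity)
    have hmin : min n ((k : Int) * c + c) = (k : Int) * c + c := by
      apply min_eq_right; linarith [hk]; 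
    push_cast
    rw [hsplit, List.foldl_append, ih hk']
    simp only [List.foldl]
    rw [hmin]
    rw [if_pos (by linarith)]
    simp [List.replicate_succ']

theorem resolve_eq_of_pos (n : Int) (hn : 0 < n) :
    resolve_multi_record_default_row_counts_py n = resolve_multi_record_default_row_counts_py_alt n := by
  have hn' : ¬ n ≤ 0 := by omega
  unfold resolve_multi_record_default_row_counts_py resolve_multi_record_default_row_counts_py_alt
      estimate_square_grid_py
  rw [if_neg hn', if_neg hn', if_neg hn']
  simp only []
  rw [← ceilSqrt_eq n hn]
  set c := pyCeilSqrt n with hcdef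
  obtain ⟨hc0, hcn⟩ := pyCeilSqrt_bounds n hn
  set full := PySem.Int.floordiv n c with hfull
  set rem := PySem.Int.mod n c with hrem
  have heq : full * c + rem = n := PySem.Int.floordiv_mul_add_mod n c
  have hr0 : 0 ≤ rem := PySem.Int.mod_nonneg n hc0
  have hrc : rem < c := PySem.Int.mod_lt n hc0
  have hfull0 : 0 ≤ full := by
    rw [hfull, PySem.Int.floordiv_eq_ediv_of_pos hc0]
    exact Int.ediv_nonneg (le_of_lt hn) (le_of_lt hc0)
  have hfc : ((full.toNat : Int)) = full := by omega
  have hrows : pyCeilDiv n c = full + (if rem = 0 then (0:Int) else 1) := by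
    unfold pyCeilDiv
    rw [PySem.Int.neg_floordiv_neg_eq_iff_of_pos hc0]
    constructor
    · split_ifs with h
      · nlinarith
      · have hrpos : 0 < rem := by omega
        nlinarith
    · split_ifs with h
      · nlinarith
      · nlinarith
  by_cases hr : rem = 0
  · have h1 : pyCeilDiv n c = ((full.toNat : Int)) := by rw [hrows, hr, hfc]; simp
    rw [h1, loop_replicate n c hc0 full.toNat (by rw [hfc]; nlinarith)]
    simp [hr]
  · have h1 : pyCeilDiv n c = ((full.toNat : Int)) + 1 := by rw [hrows, hfc]; simp [hr]
    rw [h1, PySem.List.pyRange_one_succ_right (by positivity), List.foldl_append,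
        loop_replicate n c hc0 full.toNat (by rw [hfc]; nlinarith)]
    simp only [List.foldl]
    show (if min n ((full.toNat : Int) * c + c) > (full.toNat : Int) * c then
        List.replicate full.toNat c ++ [min n ((full.toNat : Int) * c + c) - (full.toNat : Int) * c]
      else List.replicate full.toNat c)
      = List.replicate full.toNat c ++ (if rem ≠ 0 then [rem] else [])
    rw [hfc, if_pos (by omega)]
    have hlast : min n (full * c + c) - full * c = rem := by omega
    rw [hlast]
    simp [hr]

-- ===== VERDICT (by name: the statement is the Claim_ definition above) =====
theorem resolve_multi_record_default_row_counts_py_spec : Claim_equal_resolve_multi_record_default_row_counts_py := by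
  intro n _
  unfold Spec_resolve_multi_record_default_row_counts_py
  by_cases hn : n ≤ 0
  · simp [resolve_multi_record_default_row_counts_py, resolve_multi_record_default_row_counts_py_alt, hn]
  · exact resolve_eq_of_pos n (by omega)
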